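-- pv_equiv track=rewrite | github.com/karellen-kim/training-algorithm | src/main/python/cci/array.py | replace_v2
-- ===== SOURCE A (Python) =====
-- def replaceRow(matrix, num, row) :
--     for i in range(0, len(matrix[0])) :
--         matrix[row][i] = num
--     return matrix
--
-- def replaceCol(matrix, num, col) :
--     for i in range(0, len(matrix)) :
--         matrix[i][col] = num
--     return matrix
--
-- def replace_v2(matrix, num) :
--     rows = []
--     cols = []
--     for row in range(0, len(matrix)) :
--         for col in range(0, len(matrix[0])) :
--             if matrix[row][col] == num :
--                 rows.append(row)
--                 cols.append(col)
--     for r in rows :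
--         replaceRow(matrix, num, r)
--     for c in cols :
--         replaceCol(matrix, num, c)
--     return matrix
-- ===== SOURCE B (Python) =====
-- def replace_v2(matrix, num):
--     hit_rows = set()
--     hit_cols = set()
--     for r in range(len(matrix)):
--         for c in range(len(matrix[0])):
--             if matrix[r][c] == num:
--                 hit_rows.add(r)
--                 hit_cols.add(c)
--     for r in range(len(matrix)):
--         for c in range(len(matrix[0])):
--             if r in hit_rows or c in hit_cols:
--                 matrix[r][c] = num
--     return matrix
-- ===== Notes on version B (the rewrite author's own statement) =====
-- stated objective: alternative
-- what changed: Instead of recording duplicate-laden rows/cols lists and running a full write loop per recorded entry (replaceRow/replaceCol helpers), B builds the hit rows and hit columns once as sets and then writes num in a single membership-guarded pass over all cells; Pre_ excludes ragged matrices whose later rows are shorter than row 0, on which A raises IndexError during its scan.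
import Mathlib
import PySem

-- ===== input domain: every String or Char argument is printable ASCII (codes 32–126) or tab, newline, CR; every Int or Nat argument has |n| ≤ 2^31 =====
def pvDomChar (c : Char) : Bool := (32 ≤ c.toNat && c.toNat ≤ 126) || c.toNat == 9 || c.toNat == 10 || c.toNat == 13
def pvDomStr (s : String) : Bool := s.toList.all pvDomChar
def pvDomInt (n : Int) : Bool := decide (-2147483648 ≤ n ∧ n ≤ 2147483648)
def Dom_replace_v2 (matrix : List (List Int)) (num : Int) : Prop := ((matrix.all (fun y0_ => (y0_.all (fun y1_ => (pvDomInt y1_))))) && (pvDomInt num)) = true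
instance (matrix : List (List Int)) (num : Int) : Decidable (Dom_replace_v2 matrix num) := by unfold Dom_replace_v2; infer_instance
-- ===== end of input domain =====

-- B replaces A's duplicate-recording rows/cols lists and per-entry full row/col rewrite loops
-- (replaceRow/replaceCol) by two hit-sets built in one scan and a single membership-guarded write
-- pass over all cells; like A, B mutates the matrix in place — the equivalence proved is about the return value.


-- ===== PORT A =====
-- matrix[r][c] read; the default is unreachable: every use is at in-range indices admitted by Pre_
def cellD (mat : List (List Int)) (r c : Nat) : Int := (mat.getD r []).getD c 0
-- matrix[r][c] = v assignment; exact for the in-range indices produced by the loops (List.set is a no-op out of range, which is never hit inside Pre_)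
def setCell (mat : List (List Int)) (r c : Nat) (v : Int) : List (List Int) :=
  mat.set r ((mat.getD r []).set c v)

def replaceRow (mat : List (List Int)) (num : Int) (row : Nat) : List (List Int) :=
  (List.range (mat.headD []).length).foldl (fun m i => setCell m row i num) mat

def replaceCol (mat : List (List Int)) (num : Int) (col : Nat) : List (List Int) :=
  (List.range mat.length).foldl (fun m i => setCell m i col num) mat

def replace_v2 (matrix : List (List Int)) (num : Int) : List (List Int) :=
  let scan := (List.range matrix.length).foldl (fun (acc : List Nat × List Nat) row =>
      (List.range (matrix.headD []).length).foldl (fun acc col =>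
        if cellD matrix row col = num then (acc.1 ++ [row], acc.2 ++ [col]) else acc) acc)
    ([], [])
  scan.2.foldl (fun m c => replaceCol m num c) (scan.1.foldl (fun m r => replaceRow m num r) matrix)

-- ===== PORT B =====
def replace_v2_alt (matrix : List (List Int)) (num : Int) : List (List Int) :=
  let hits := (List.range matrix.length).foldl (fun (acc : PySem.Set Nat × PySem.Set Nat) r =>
      (List.range (matrix.headD []).length).foldl (fun acc c =>
        if cellD matrix r c = num then (acc.1.add r, acc.2.add c) else acc) acc)
    (PySem.Set.empty, PySem.Set.empty)
  (List.range matrix.length).foldl (fun mat r =>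
      (List.range (matrix.headD []).length).foldl (fun mat c =>
        if PySem.Set.contains hits.1 r || PySem.Set.contains hits.2 c then setCell mat r c num
        else mat) mat)
    matrix

-- ===== PRECONDITION & SPEC =====
-- Pre_ excludes exactly the ragged matrices with a row shorter than row 0, on which A's scan raises IndexError.
def Pre_replace_v2 (matrix : List (List Int)) (num : Int) : Prop :=
  ∀ row ∈ matrix, (matrix.headD []).length ≤ row.length
instance (matrix : List (List Int)) (num : Int) : Decidable (Pre_replace_v2 matrix num) := by
  unfold Pre_replace_v2; infer_instance

def pvWitness_replace_v2 : List (List Int) × Int := ([[1, 2], [3, 1]], 1)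

def Spec_replace_v2 (matrix : List (List Int)) (num : Int) (out : List (List Int)) : Prop := out = replace_v2_alt matrix num
instance (matrix : List (List Int)) (num : Int) (out : List (List Int)) : Decidable (Spec_replace_v2 matrix num out) := by unfold Spec_replace_v2; infer_instance

-- ===== CLAIM (what is proved, stated in full; the proofs are below) =====
def Claim_equal_replace_v2 : Prop := ∀ (matrix : List (List Int)) (num : Int), Dom_replace_v2 matrix num → Pre_replace_v2 matrix num → Spec_replace_v2 matrix num (replace_v2 matrix num)

-- ===== LEMMAS AND PROOFS =====

-- proof-side abbreviations
def wfold (num : Int) (ws : List (Nat × Nat)) (mat : List (List Int)) : List (List Int) :=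
  ws.foldl (fun m p => setCell m p.1 p.2 num) mat

def hitRow (matrix : List (List Int)) (num : Int) (m r : Nat) : Prop :=
  ∃ c, c < m ∧ cellD matrix r c = num

def hitCol (matrix : List (List Int)) (num : Int) (c : Nat) : Prop :=
  ∃ r, r < matrix.length ∧ cellD matrix r c = num

def scanA (matrix : List (List Int)) (num : Int) : List Nat × List Nat :=
  (List.range matrix.length).foldl (fun (acc : List Nat × List Nat) row =>
      (List.range (matrix.headD []).length).foldl (fun acc col =>
        if cellD matrix row col = num then (acc.1 ++ [row], acc.2 ++ [col]) else acc) acc)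
    ([], [])

def hitsB (matrix : List (List Int)) (num : Int) : PySem.Set Nat × PySem.Set Nat :=
  (List.range matrix.length).foldl (fun (acc : PySem.Set Nat × PySem.Set Nat) r =>
      (List.range (matrix.headD []).length).foldl (fun acc c =>
        if cellD matrix r c = num then (acc.1.add r, acc.2.add c) else acc) acc)
    (PySem.Set.empty, PySem.Set.empty)

lemma getD_set' {α : Type} (l : List α) (i j : Nat) (a d : α) :
    (l.set i a).getD j d = if i = j ∧ j < l.length then a else l.getD j d := by
  simp only [List.getD_eq_getElem?_getD, List.getElem?_set]
  rcases eq_or_ne i j with rfl | hne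
  · by_cases h : i < l.length
    · simp [h]
    · simp [h]
  · simp [hne]

lemma getD_eq_get {α : Type} (l : List α) (i : Nat) (d : α) (h : i < l.length) :
    l.getD i d = l[i] := by
  simp [List.getD_eq_getElem?_getD, List.getElem?_eq_getElem h]

lemma setCell_length (mat : List (List Int)) (r c : Nat) (v : Int) :
    (setCell mat r c v).length = mat.length := by simp [setCell]

lemma rowlen_setCell (mat : List (List Int)) (r c : Nat) (v : Int) (r' : Nat) :
    ((setCell mat r c v).getD r' []).length = (mat.getD r' []).length := by
  simp only [setCell, getD_set']
  split_ifs with h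
  · rcases h with ⟨rfl, _⟩; simp
  · rfl

lemma cellD_setCell (mat : List (List Int)) (a b : Nat) (v : Int) (r c : Nat) :
    cellD (setCell mat a b v) r c =
      if r = a ∧ c = b ∧ r < mat.length ∧ c < (mat.getD r []).length then v
      else cellD mat r c := by
  unfold cellD setCell
  rw [getD_set']
  by_cases hra : a = r
  · subst hra
    by_cases hlen : a < mat.length
    · rw [if_pos ⟨rfl, hlen⟩, getD_set']
      by_cases hcb : b = c
      · subst hcb
        by_cases hcl : b < (mat.getD a []).length
        · rw [if_pos ⟨rfl, hcl⟩, if_pos ⟨rfl, rfl, hlen, hcl⟩]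
        · rw [if_neg (by tauto), if_neg (by tauto)]
      · rw [if_neg (by tauto), if_neg (by tauto)]
    · rw [if_neg (by tauto), if_neg (by tauto)]
  · rw [if_neg (by tauto), if_neg (by tauto)]

lemma wfold_length (num : Int) (ws : List (Nat × Nat)) (mat : List (List Int)) :
    (wfold num ws mat).length = mat.length := by
  induction ws generalizing mat with
  | nil => rfl
  | cons w ws ih => simp only [wfold, List.foldl_cons] at ih ⊢; rw [ih, setCell_length]

lemma wfold_rowlen (num : Int) (ws : List (Nat × Nat)) (mat : List (List Int)) (r : Nat) :
    ((wfold num ws mat).getD r []).length = (mat.getD r []).length := by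
  induction ws generalizing mat with
  | nil => rfl
  | cons w ws ih => simp only [wfold, List.foldl_cons] at ih ⊢; rw [ih, rowlen_setCell]

lemma wfold_append (num : Int) (ws₁ ws₂ : List (Nat × Nat)) (mat : List (List Int)) :
    wfold num (ws₁ ++ ws₂) mat = wfold num ws₂ (wfold num ws₁ mat) := by
  simp [wfold, List.foldl_append]

lemma cellD_wfold (num : Int) (ws : List (Nat × Nat)) (mat : List (List Int)) (r c : Nat) :
    cellD (wfold num ws mat) r c =
      if (r, c) ∈ ws ∧ r < mat.length ∧ c < (mat.getD r []).length then num
      else cellD mat r c := by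
  induction ws generalizing mat with
  | nil => simp [wfold]
  | cons w ws ih =>
    simp only [wfold, List.foldl_cons] at ih ⊢
    rw [ih, setCell_length, rowlen_setCell, cellD_setCell]
    by_cases hG : r < mat.length ∧ c < (mat.getD r []).length <;>
      by_cases hE : r = w.1 ∧ c = w.2 <;>
        by_cases hP : (r, c) ∈ ws <;>
          simp_all [List.mem_cons, Prod.ext_iff] <;>
            split_ifs <;> tauto

lemma replaceRow_eq (mat : List (List Int)) (num : Int) (row : Nat) :
    replaceRow mat num row =
      wfold num ((List.range (mat.headD []).length).map (fun c => (row, c))) mat := by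
  simp [replaceRow, wfold, List.foldl_map]

lemma replaceCol_eq (mat : List (List Int)) (num : Int) (col : Nat) :
    replaceCol mat num col =
      wfold num ((List.range mat.length).map (fun r => (r, col))) mat := by
  simp [replaceCol, wfold, List.foldl_map]

lemma headD_eq_getD (l : List (List Int)) : l.headD [] = l.getD 0 [] := by
  cases l <;> rfl

lemma foldl_replaceRow_eq (num : Int) (m : Nat) (rows : List Nat) :
    ∀ mat : List (List Int), (mat.headD []).length = m →
      rows.foldl (fun mm r => replaceRow mm num r) mat =
        wfold num (rows.flatMap (fun r => (List.range m).map (fun c => (r, c)))) mat := by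
  induction rows with
  | nil => intro mat _; rfl
  | cons r rows ih =>
    intro mat hm
    simp only [List.foldl_cons, List.flatMap_cons]
    have h' : ((wfold num ((List.range m).map (fun c => (r, c))) mat).headD []).length = m := by
      rw [headD_eq_getD, wfold_rowlen, ← headD_eq_getD, hm]
    rw [replaceRow_eq, hm, wfold_append, ih _ h']

lemma foldl_replaceCol_eq (num : Int) (n : Nat) (cols : List Nat) :
    ∀ mat : List (List Int), mat.length = n →
      cols.foldl (fun mm c => replaceCol mm num c) mat =
        wfold num (cols.flatMap (fun c => (List.range n).map (fun r => (r, c)))) mat := by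
  induction cols with
  | nil => intro mat _; rfl
  | cons c cols ih =>
    intro mat hn
    simp only [List.foldl_cons, List.flatMap_cons]
    have h' : (wfold num ((List.range n).map (fun r => (r, c))) mat).length = n := by
      rw [wfold_length, hn]
    rw [replaceCol_eq, hn, wfold_append, ih _ h']

lemma innerA_mem (matrix : List (List Int)) (num : Int) (row : Nat) (k : Nat) :
    ∀ acc : List Nat × List Nat,
      (∀ x, x ∈ ((List.range k).foldl (fun acc col =>
          if cellD matrix row col = num then (acc.1 ++ [row], acc.2 ++ [col]) else acc) acc).1 ↔
        x ∈ acc.1 ∨ (x = row ∧ ∃ c, c < k ∧ cellD matrix row c = num)) ∧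
      (∀ y, y ∈ ((List.range k).foldl (fun acc col =>
          if cellD matrix row col = num then (acc.1 ++ [row], acc.2 ++ [col]) else acc) acc).2 ↔
        y ∈ acc.2 ∨ (y < k ∧ cellD matrix row y = num)) := by
  induction k with
  | zero => intro acc; simp
  | succ k ih =>
    intro acc
    rw [List.range_succ, List.foldl_append]
    obtain ⟨ih1, ih2⟩ := ih acc
    by_cases h : cellD matrix row k = num
    · simp only [List.foldl_cons, List.foldl_nil, if_pos h]
      refine ⟨fun x => ?_, fun y => ?_⟩
      · simp only [List.mem_append, List.mem_singleton, ih1 x]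
        constructor
        · rintro ((hx | ⟨rfl, c, hc, hP⟩) | rfl)
          · exact Or.inl hx
          · exact Or.inr ⟨rfl, c, Nat.lt_succ_of_lt hc, hP⟩
          · exact Or.inr ⟨rfl, k, Nat.lt_succ_self _, h⟩
        · rintro (hx | ⟨rfl, _⟩)
          · exact Or.inl (Or.inl hx)
          · exact Or.inr rfl
      · simp only [List.mem_append, List.mem_singleton, ih2 y]
        constructor
        · rintro ((hy | ⟨hk, hP⟩) | rfl)
          · exact Or.inl hy
          · exact Or.inr ⟨Nat.lt_succ_of_lt hk, hP⟩
          · exact Or.inr ⟨Nat.lt_succ_self _, h⟩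
        · rintro (hy | ⟨hk, hP⟩)
          · exact Or.inl (Or.inl hy)
          · rcases Nat.lt_succ_iff_lt_or_eq.mp hk with h' | rfl
            · exact Or.inl (Or.inr ⟨h', hP⟩)
            · exact Or.inr rfl
    · simp only [List.foldl_cons, List.foldl_nil, if_neg h]
      refine ⟨fun x => ?_, fun y => ?_⟩
      · rw [ih1]
        constructor
        · rintro (hx | ⟨rfl, c, hc, hP⟩)
          · exact Or.inl hx
          · exact Or.inr ⟨rfl, c, Nat.lt_succ_of_lt hc, hP⟩
        · rintro (hx | ⟨rfl, c, hc, hP⟩)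
          · exact Or.inl hx
          · rcases Nat.lt_succ_iff_lt_or_eq.mp hc with h' | rfl
            · exact Or.inr ⟨rfl, c, h', hP⟩
            · exact absurd hP h
      · rw [ih2]
        constructor
        · rintro (hy | ⟨hk, hP⟩)
          · exact Or.inl hy
          · exact Or.inr ⟨Nat.lt_succ_of_lt hk, hP⟩
        · rintro (hy | ⟨hk, hP⟩)
          · exact Or.inl hy
          · rcases Nat.lt_succ_iff_lt_or_eq.mp hk with h' | rfl
            · exact Or.inr ⟨h', hP⟩
            · exact absurd hP h

lemma outerA_mem (matrix : List (List Int)) (num : Int) (k : Nat) :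
    ∀ acc : List Nat × List Nat,
      (∀ x, x ∈ ((List.range k).foldl (fun (acc : List Nat × List Nat) row =>
          (List.range (matrix.headD []).length).foldl (fun acc col =>
            if cellD matrix row col = num then (acc.1 ++ [row], acc.2 ++ [col]) else acc) acc) acc).1 ↔
        x ∈ acc.1 ∨ (x < k ∧ hitRow matrix num (matrix.headD []).length x)) ∧
      (∀ y, y ∈ ((List.range k).foldl (fun (acc : List Nat × List Nat) row =>
          (List.range (matrix.headD []).length).foldl (fun acc col =>
            if cellD matrix row col = num then (acc.1 ++ [row], acc.2 ++ [col]) else acc) acc) acc).2 ↔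
        y ∈ acc.2 ∨ (y < (matrix.headD []).length ∧ ∃ r, r < k ∧ cellD matrix r y = num)) := by
  induction k with
  | zero => intro acc; simp
  | succ k ih =>
    intro acc
    rw [List.range_succ, List.foldl_append]
    obtain ⟨ih1, ih2⟩ := ih acc
    simp only [List.foldl_cons, List.foldl_nil]
    obtain ⟨in1, in2⟩ := innerA_mem matrix num k (matrix.headD []).length
      ((List.range k).foldl (fun (acc : List Nat × List Nat) row =>
          (List.range (matrix.headD []).length).foldl (fun acc col =>
            if cellD matrix row col = num then (acc.1 ++ [row], acc.2 ++ [col]) else acc) acc) acc)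
    refine ⟨fun x => ?_, fun y => ?_⟩
    · rw [in1, ih1]
      constructor
      · rintro ((hx | ⟨hk, hh⟩) | ⟨rfl, hh⟩)
        · exact Or.inl hx
        · exact Or.inr ⟨Nat.lt_succ_of_lt hk, hh⟩
        · exact Or.inr ⟨Nat.lt_succ_self _, hh⟩
      · rintro (hx | ⟨hk, hh⟩)
        · exact Or.inl (Or.inl hx)
        · rcases Nat.lt_succ_iff_lt_or_eq.mp hk with h' | rfl
          · exact Or.inl (Or.inr ⟨h', hh⟩)
          · exact Or.inr ⟨rfl, hh⟩
    · rw [in2, ih2]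
      constructor
      · rintro ((hy | ⟨hm, r, hr, hP⟩) | ⟨hm, hP⟩)
        · exact Or.inl hy
        · exact Or.inr ⟨hm, r, Nat.lt_succ_of_lt hr, hP⟩
        · exact Or.inr ⟨hm, k, Nat.lt_succ_self _, hP⟩
      · rintro (hy | ⟨hm, r, hr, hP⟩)
        · exact Or.inl (Or.inl hy)
        · rcases Nat.lt_succ_iff_lt_or_eq.mp hr with h' | rfl
          · exact Or.inl (Or.inr ⟨hm, r, h', hP⟩)
          · exact Or.inr ⟨hm, hP⟩

lemma scanA_mem (matrix : List (List Int)) (num : Int) :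
    (∀ r, r ∈ (scanA matrix num).1 ↔
        r < matrix.length ∧ hitRow matrix num (matrix.headD []).length r) ∧
    (∀ c, c ∈ (scanA matrix num).2 ↔
        c < (matrix.headD []).length ∧ hitCol matrix num c) := by
  obtain ⟨h1, h2⟩ := outerA_mem matrix num matrix.length ([], [])
  constructor
  · intro r; unfold scanA; rw [h1]; simp
  · intro c; unfold scanA; rw [h2]; simp [hitCol]

lemma innerB_mem (matrix : List (List Int)) (num : Int) (row : Nat) (k : Nat) :
    ∀ acc : PySem.Set Nat × PySem.Set Nat,
      (∀ x, x ∈ ((List.range k).foldl (fun (acc : PySem.Set Nat × PySem.Set Nat) c =>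
          if cellD matrix row c = num then (acc.1.add row, acc.2.add c) else acc) acc).1 ↔
        x ∈ acc.1 ∨ (x = row ∧ ∃ c, c < k ∧ cellD matrix row c = num)) ∧
      (∀ y, y ∈ ((List.range k).foldl (fun (acc : PySem.Set Nat × PySem.Set Nat) c =>
          if cellD matrix row c = num then (acc.1.add row, acc.2.add c) else acc) acc).2 ↔
        y ∈ acc.2 ∨ (y < k ∧ cellD matrix row y = num)) := by
  induction k with
  | zero => intro acc; simp
  | succ k ih =>
    intro acc
    rw [List.range_succ, List.foldl_append]
    obtain ⟨ih1, ih2⟩ := ih acc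
    by_cases h : cellD matrix row k = num
    · simp only [List.foldl_cons, List.foldl_nil, if_pos h]
      refine ⟨fun x => ?_, fun y => ?_⟩
      · rw [PySem.Set.mem_add, ih1]
        constructor
        · rintro ((hx | ⟨rfl, c, hc, hP⟩) | rfl)
          · exact Or.inl hx
          · exact Or.inr ⟨rfl, c, Nat.lt_succ_of_lt hc, hP⟩
          · exact Or.inr ⟨rfl, k, Nat.lt_succ_self _, h⟩
        · rintro (hx | ⟨rfl, _⟩)
          · exact Or.inl (Or.inl hx)
          · exact Or.inr rfl
      · rw [PySem.Set.mem_add, ih2]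
        constructor
        · rintro ((hy | ⟨hk, hP⟩) | rfl)
          · exact Or.inl hy
          · exact Or.inr ⟨Nat.lt_succ_of_lt hk, hP⟩
          · exact Or.inr ⟨Nat.lt_succ_self _, h⟩
        · rintro (hy | ⟨hk, hP⟩)
          · exact Or.inl (Or.inl hy)
          · rcases Nat.lt_succ_iff_lt_or_eq.mp hk with h' | rfl
            · exact Or.inl (Or.inr ⟨h', hP⟩)
            · exact Or.inr rfl
    · simp only [List.foldl_cons, List.foldl_nil, if_neg h]
      refine ⟨fun x => ?_, fun y => ?_⟩
      · rw [ih1]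
        constructor
        · rintro (hx | ⟨rfl, c, hc, hP⟩)
          · exact Or.inl hx
          · exact Or.inr ⟨rfl, c, Nat.lt_succ_of_lt hc, hP⟩
        · rintro (hx | ⟨rfl, c, hc, hP⟩)
          · exact Or.inl hx
          · rcases Nat.lt_succ_iff_lt_or_eq.mp hc with h' | rfl
            · exact Or.inr ⟨rfl, c, h', hP⟩
            · exact absurd hP h
      · rw [ih2]
        constructor
        · rintro (hy | ⟨hk, hP⟩)
          · exact Or.inl hy
          · exact Or.inr ⟨Nat.lt_succ_of_lt hk, hP⟩
        · rintro (hy | ⟨hk, hP⟩)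
          · exact Or.inl hy
          · rcases Nat.lt_succ_iff_lt_or_eq.mp hk with h' | rfl
            · exact Or.inr ⟨h', hP⟩
            · exact absurd hP h

lemma outerB_mem (matrix : List (List Int)) (num : Int) (k : Nat) :
    ∀ acc : PySem.Set Nat × PySem.Set Nat,
      (∀ x, x ∈ ((List.range k).foldl (fun (acc : PySem.Set Nat × PySem.Set Nat) r =>
          (List.range (matrix.headD []).length).foldl (fun acc c =>
            if cellD matrix r c = num then (acc.1.add r, acc.2.add c) else acc) acc) acc).1 ↔
        x ∈ acc.1 ∨ (x < k ∧ hitRow matrix num (matrix.headD []).length x)) ∧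
      (∀ y, y ∈ ((List.range k).foldl (fun (acc : PySem.Set Nat × PySem.Set Nat) r =>
          (List.range (matrix.headD []).length).foldl (fun acc c =>
            if cellD matrix r c = num then (acc.1.add r, acc.2.add c) else acc) acc) acc).2 ↔
        y ∈ acc.2 ∨ (y < (matrix.headD []).length ∧ ∃ r, r < k ∧ cellD matrix r y = num)) := by
  induction k with
  | zero => intro acc; simp
  | succ k ih =>
    intro acc
    rw [List.range_succ, List.foldl_append]
    obtain ⟨ih1, ih2⟩ := ih acc
    simp only [List.foldl_cons, List.foldl_nil]
    obtain ⟨in1, in2⟩ := innerB_mem matrix num k (matrix.headD []).length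
      ((List.range k).foldl (fun (acc : PySem.Set Nat × PySem.Set Nat) r =>
          (List.range (matrix.headD []).length).foldl (fun acc c =>
            if cellD matrix r c = num then (acc.1.add r, acc.2.add c) else acc) acc) acc)
    refine ⟨fun x => ?_, fun y => ?_⟩
    · rw [in1, ih1]
      constructor
      · rintro ((hx | ⟨hk, hh⟩) | ⟨rfl, hh⟩)
        · exact Or.inl hx
        · exact Or.inr ⟨Nat.lt_succ_of_lt hk, hh⟩
        · exact Or.inr ⟨Nat.lt_succ_self _, hh⟩
      · rintro (hx | ⟨hk, hh⟩)
        · exact Or.inl (Or.inl hx)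
        · rcases Nat.lt_succ_iff_lt_or_eq.mp hk with h' | rfl
          · exact Or.inl (Or.inr ⟨h', hh⟩)
          · exact Or.inr ⟨rfl, hh⟩
    · rw [in2, ih2]
      constructor
      · rintro ((hy | ⟨hm, r, hr, hP⟩) | ⟨hm, hP⟩)
        · exact Or.inl hy
        · exact Or.inr ⟨hm, r, Nat.lt_succ_of_lt hr, hP⟩
        · exact Or.inr ⟨hm, k, Nat.lt_succ_self _, hP⟩
      · rintro (hy | ⟨hm, r, hr, hP⟩)
        · exact Or.inl (Or.inl hy)
        · rcases Nat.lt_succ_iff_lt_or_eq.mp hr with h' | rfl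
          · exact Or.inl (Or.inr ⟨hm, r, h', hP⟩)
          · exact Or.inr ⟨hm, hP⟩

lemma hitsB_mem (matrix : List (List Int)) (num : Int) :
    (∀ r, r ∈ (hitsB matrix num).1 ↔
        r < matrix.length ∧ hitRow matrix num (matrix.headD []).length r) ∧
    (∀ c, c ∈ (hitsB matrix num).2 ↔
        c < (matrix.headD []).length ∧ hitCol matrix num c) := by
  obtain ⟨h1, h2⟩ := outerB_mem matrix num matrix.length (PySem.Set.empty, PySem.Set.empty)
  constructor
  · intro r; unfold hitsB; rw [h1]; simp [PySem.Set.empty]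
  · intro c; unfold hitsB; rw [h2]; simp [PySem.Set.empty, hitCol]

lemma replace_v2_eq (matrix : List (List Int)) (num : Int) :
    replace_v2 matrix num =
      (scanA matrix num).2.foldl (fun m c => replaceCol m num c)
        ((scanA matrix num).1.foldl (fun m r => replaceRow m num r) matrix) := rfl

-- B's guarded double write loop, as a wfold over a filtered cell list
lemma gfold_eq (num : Int) (P : Nat → Nat → Bool) (n m : Nat) (mat0 : List (List Int)) :
    (List.range n).foldl (fun mat r =>
        (List.range m).foldl (fun mat c => if P r c then setCell mat r c num else mat) mat) mat0
      = wfold num ((List.range n).flatMap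
          (fun r => ((List.range m).filter (P r)).map (fun c => (r, c)))) mat0 := by
  unfold wfold
  rw [List.foldl_flatMap]
  have hstep : (fun (mat : List (List Int)) (r : Nat) =>
      (((List.range m).filter (P r)).map (fun c => (r, c))).foldl
        (fun mm p => setCell mm p.1 p.2 num) mat)
    = (fun (mat : List (List Int)) (r : Nat) =>
      (List.range m).foldl (fun mm c => if P r c then setCell mm r c num else mm) mat) := by
    funext mat r
    rw [List.foldl_map, List.foldl_filter]
  rw [hstep]

lemma gfold_mem (P : Nat → Nat → Bool) (n m : Nat) (r c : Nat) :
    ((r, c) ∈ (List.range n).flatMap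
        (fun r => ((List.range m).filter (P r)).map (fun c => (r, c)))) ↔
      (r < n ∧ c < m ∧ P r c = true) := by
  simp only [List.mem_flatMap, List.mem_map, List.mem_filter, List.mem_range, Prod.mk.injEq]
  constructor
  · rintro ⟨r', hr', c', ⟨hc', hP⟩, rfl, rfl⟩
    exact ⟨hr', hc', hP⟩
  · rintro ⟨hr, hc, hP⟩
    exact ⟨r, hr, c, ⟨hc, hP⟩, rfl, rfl⟩

lemma replace_v2_alt_eq (matrix : List (List Int)) (num : Int) :
    replace_v2_alt matrix num =
      (List.range matrix.length).foldl (fun mat r =>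
        (List.range (matrix.headD []).length).foldl (fun mat c =>
          if PySem.Set.contains (hitsB matrix num).1 r ||
             PySem.Set.contains (hitsB matrix num).2 c then setCell mat r c num
          else mat) mat) matrix := rfl

lemma cellD_eq_getElem (mat : List (List Int)) (r c : Nat)
    (hr : r < mat.length) (hc : c < mat[r].length) : cellD mat r c = mat[r][c] := by
  rw [cellD, getD_eq_get _ _ _ hr, getD_eq_get _ _ _ hc]

lemma matrix_eq_of_cellD (mat1 mat2 : List (List Int))
    (hlen : mat1.length = mat2.length)
    (hrow : ∀ r, (mat1.getD r []).length = (mat2.getD r []).length)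
    (hcell : ∀ r c, r < mat1.length → c < (mat1.getD r []).length →
      cellD mat1 r c = cellD mat2 r c) : mat1 = mat2 := by
  apply List.ext_getElem hlen
  intro r h1 h2
  have hr1 : (mat1.getD r []).length = mat1[r].length := by rw [getD_eq_get _ _ _ h1]
  apply List.ext_getElem
  · rw [← hr1, hrow r, getD_eq_get _ _ _ h2]
  · intro c hc1 hc2
    rw [← cellD_eq_getElem _ _ _ h1 hc1, ← cellD_eq_getElem _ _ _ h2 hc2]
    exact hcell r c h1 (by rw [hr1]; exact hc1)

-- ===== VERDICT (by name: the statement is the Claim_ definition above) =====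
theorem replace_v2_spec : Claim_equal_replace_v2 := by
  intro matrix num _ hpre
  unfold Spec_replace_v2
  unfold Pre_replace_v2 at hpre
  set n := matrix.length with hn
  set m := (matrix.headD []).length with hm
  have hrowlen : ∀ r, r < n → m ≤ (matrix.getD r []).length := by
    intro r hr
    rw [getD_eq_get _ _ _ hr]
    exact hpre _ (List.getElem_mem hr)
  obtain ⟨hscan1, hscan2⟩ := scanA_mem matrix num
  obtain ⟨hB1, hB2⟩ := hitsB_mem matrix num
  -- A as one write-fold
  have hA : replace_v2 matrix num =
      wfold num
        ((scanA matrix num).1.flatMap (fun r => (List.range m).map (fun c => (r, c))) ++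
         (scanA matrix num).2.flatMap (fun c => (List.range n).map (fun r => (r, c))))
        matrix := by
    rw [replace_v2_eq,
      foldl_replaceRow_eq num m ((scanA matrix num).1) matrix rfl,
      foldl_replaceCol_eq num n ((scanA matrix num).2) _ (wfold_length _ _ _),
      ← wfold_append]
  set P : Nat → Nat → Bool := fun r c =>
    PySem.Set.contains (hitsB matrix num).1 r || PySem.Set.contains (hitsB matrix num).2 c
    with hP
  -- B as one write-fold
  have hB : replace_v2_alt matrix num =
      wfold num ((List.range n).flatMap
        (fun r => ((List.range m).filter (P r)).map (fun c => (r, c)))) matrix := by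
    rw [replace_v2_alt_eq, gfold_eq]
  -- the two write lists cover the same cells
  have hWA : ∀ r c : Nat,
      ((r, c) ∈
        (scanA matrix num).1.flatMap (fun r => (List.range m).map (fun c => (r, c))) ++
        (scanA matrix num).2.flatMap (fun c => (List.range n).map (fun r => (r, c)))) ↔
      (r < n ∧ c < m ∧ (hitRow matrix num m r ∨ hitCol matrix num c)) := by
    intro r c
    simp only [List.mem_append, List.mem_flatMap, List.mem_map, List.mem_range,
      Prod.mk.injEq, hscan1, hscan2]
    constructor
    · rintro (⟨r', ⟨hr'n, hhr⟩, c', hc'm, rfl, rfl⟩ | ⟨c', ⟨hc'm, hhc⟩, r', hr'n, rfl, rfl⟩)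
      · exact ⟨hr'n, hc'm, Or.inl hhr⟩
      · exact ⟨hr'n, hc'm, Or.inr hhc⟩
    · rintro ⟨hrn, hcm, hh | hh⟩
      · exact Or.inl ⟨r, ⟨hrn, hh⟩, c, hcm, rfl, rfl⟩
      · exact Or.inr ⟨c, ⟨hcm, hh⟩, r, hrn, rfl, rfl⟩
  have hWB : ∀ r c : Nat,
      ((r, c) ∈ (List.range n).flatMap
          (fun r => ((List.range m).filter (P r)).map (fun c => (r, c)))) ↔
      (r < n ∧ c < m ∧ (hitRow matrix num m r ∨ hitCol matrix num c)) := by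
    intro r c
    rw [gfold_mem]
    constructor
    · rintro ⟨hrn, hcm, hPrc⟩
      rcases Bool.or_eq_true_iff.mp hPrc with hh | hh
      · exact ⟨hrn, hcm, Or.inl ((hB1 r).mp ((PySem.Set.contains_iff _ _).mp hh)).2⟩
      · exact ⟨hrn, hcm, Or.inr ((hB2 c).mp ((PySem.Set.contains_iff _ _).mp hh)).2⟩
    · rintro ⟨hrn, hcm, hh | hh⟩
      · exact ⟨hrn, hcm, Bool.or_eq_true_iff.mpr
          (Or.inl ((PySem.Set.contains_iff _ _).mpr ((hB1 r).mpr ⟨hrn, hh⟩)))⟩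
      · exact ⟨hrn, hcm, Bool.or_eq_true_iff.mpr
          (Or.inr ((PySem.Set.contains_iff _ _).mpr ((hB2 c).mpr ⟨hcm, hh⟩)))⟩
  rw [hA, hB]
  apply matrix_eq_of_cellD
  · rw [wfold_length, wfold_length]
  · intro r; rw [wfold_rowlen, wfold_rowlen]
  · intro r c hr hc
    rw [wfold_length] at hr
    rw [wfold_rowlen] at hc
    rw [cellD_wfold, cellD_wfold]
    by_cases hcond : r < n ∧ c < m ∧ (hitRow matrix num m r ∨ hitCol matrix num c)
    · rw [if_pos ⟨(hWA r c).mpr hcond, hr, hc⟩, if_pos ⟨(hWB r c).mpr hcond, hr, hc⟩]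
    · rw [if_neg (fun hh => hcond ((hWA r c).mp hh.1)),
        if_neg (fun hh => hcond ((hWB r c).mp hh.1))]
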